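-- pv_equiv track=rewrite | github.com/tomasnyberg/cp_notebook | codeforces/719/E.py | costs
-- ===== SOURCE A (Python) =====
-- def costs(line):
--     sheep_seen = 0
--     running = 0
--     res = []
--     for c in line:
--         if c == '*':
--             sheep_seen += 1
--         else:
--             running += sheep_seen
--         res.append(running)
--     return res
-- ===== SOURCE B (Python) =====
-- def costs(line):
--     # pass 1: prefix table of sheep counts (pref[i] = number of '*' in line[:i])
--     pref = [0]
--     for c in line:
--         pref.append(pref[-1] + (c == '*'))
--     # pass 2: per-position increments
--     inc = [0 if c == '*' else p for p, c in zip(pref, line)]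
--     # pass 3: prefix-sum the increments
--     res = []
--     total = 0
--     for x in inc:
--         total += x
--         res.append(total)
--     return res
-- ===== Notes on version B (the rewrite author's own statement) =====
-- stated objective: alternative
-- what changed: Replaces the fused single loop with three separate passes: build a prefix table of sheep counts, derive per-position increments by zipping the table with the string, then prefix-sum the increments.
import Mathlib
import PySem

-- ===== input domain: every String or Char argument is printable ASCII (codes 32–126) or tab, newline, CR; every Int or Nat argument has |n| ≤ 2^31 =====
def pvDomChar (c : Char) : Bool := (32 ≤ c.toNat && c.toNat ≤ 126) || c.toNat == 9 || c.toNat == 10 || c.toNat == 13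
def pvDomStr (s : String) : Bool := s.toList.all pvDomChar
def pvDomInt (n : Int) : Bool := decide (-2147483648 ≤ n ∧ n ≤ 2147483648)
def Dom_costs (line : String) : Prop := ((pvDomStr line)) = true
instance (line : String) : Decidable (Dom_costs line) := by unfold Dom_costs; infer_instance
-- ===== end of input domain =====

-- B restructures A's fused loop into three passes (prefix table of sheep counts, increments, prefix sum); same O(n) cost, alternative decomposition.

-- ===== PORT A =====
-- state: (sheep_seen, running, res)
def costs (line : String) : List Int :=
  (line.toList.foldl
    (fun (st : Int × Int × List Int) c =>
      if c = '*' then (st.1 + 1, st.2.1, st.2.2 ++ [st.2.1])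
      else (st.1, st.2.1 + st.1, st.2.2 ++ [st.2.1 + st.1]))
    (0, 0, [])).2.2

-- ===== PORT B =====
def costs_alt (line : String) : List Int :=
  let pref : List Int := line.toList.foldl
    (fun acc c => acc ++ [acc.getLastD 0 + (if c = '*' then 1 else 0)]) [0]
  let inc : List Int := (pref.zip line.toList).map
    (fun pc => if pc.2 = '*' then 0 else pc.1)
  (inc.foldl (fun (st : Int × List Int) x => (st.1 + x, st.2 ++ [st.1 + x])) (0, [])).2

-- ===== PRECONDITION & SPEC =====
def Spec_costs (line : String) (out : List Int) : Prop := out = costs_alt line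
instance (line : String) (out : List Int) : Decidable (Spec_costs line out) := by unfold Spec_costs; infer_instance

-- ===== CLAIM (what is proved, stated in full; the proofs are below) =====
def Claim_equal_costs : Prop := ∀ (line : String), Dom_costs line → Spec_costs line (costs line)

-- ===== LEMMAS AND PROOFS =====

-- reference result: outputs of the loop starting with sheep count s and running sum r
def specF (s r : Int) : List Char → List Int
  | [] => []
  | c :: cs => if c = '*' then r :: specF (s + 1) r cs else (r + s) :: specF s (r + s) cs

theorem costs_fold (cs : List Char) : ∀ (s r : Int) (res : List Int),
    (cs.foldl
      (fun (st : Int × Int × List Int) c =>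
        if c = '*' then (st.1 + 1, st.2.1, st.2.2 ++ [st.2.1])
        else (st.1, st.2.1 + st.1, st.2.2 ++ [st.2.1 + st.1]))
      (s, r, res)).2.2 = res ++ specF s r cs := by
  induction cs with
  | nil => intro s r res; simp [specF]
  | cons c cs ih =>
    intro s r res
    by_cases h : c = '*' <;> simp [specF, h, ih]

-- prefix-count table seen from its running last value
def prefList (s : Int) : List Char → List Int
  | [] => []
  | c :: cs => (s + (if c = '*' then 1 else 0)) :: prefList (s + (if c = '*' then 1 else 0)) cs

theorem pref_fold (cs : List Char) : ∀ (acc : List Int) (s : Int), acc.getLastD 0 = s →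
    cs.foldl (fun acc c => acc ++ [acc.getLastD 0 + (if c = '*' then 1 else 0)]) acc
      = acc ++ prefList s cs := by
  induction cs with
  | nil => intro acc s _; simp [prefList]
  | cons c cs ih =>
    intro acc s hs
    simp only [List.foldl_cons, prefList, hs]
    rw [ih (acc ++ [s + (if c = '*' then 1 else 0)]) (s + (if c = '*' then 1 else 0)) (by simp)]
    simp

-- increments obtained by zipping the table with the string
def zipInc (s : Int) : List Char → List Int
  | [] => []
  | c :: cs => (if c = '*' then 0 else s) :: zipInc (s + (if c = '*' then 1 else 0)) cs

theorem zip_map (cs : List Char) : ∀ (s : Int),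
    ((s :: prefList s cs).zip cs).map (fun pc => if pc.2 = '*' then 0 else pc.1)
      = zipInc s cs := by
  induction cs with
  | nil => intro s; simp [zipInc]
  | cons c cs ih =>
    intro s
    simp only [prefList, List.zip_cons_cons, List.map_cons, zipInc]
    exact congrArg _ (ih _)

theorem acc_fold (cs : List Char) : ∀ (s t : Int) (res : List Int),
    ((zipInc s cs).foldl (fun (st : Int × List Int) x => (st.1 + x, st.2 ++ [st.1 + x])) (t, res)).2
      = res ++ specF s t cs := by
  induction cs with
  | nil => intro s t res; simp [zipInc, specF]
  | cons c cs ih =>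
    intro s t res
    by_cases h : c = '*' <;> simp [zipInc, specF, h, ih]

-- ===== VERDICT (by name: the statement is the Claim_ definition above) =====
theorem costs_spec : Claim_equal_costs := by
  intro line _
  unfold Spec_costs costs costs_alt
  rw [costs_fold, pref_fold line.toList [0] 0 (by simp)]
  simp only [List.nil_append, List.cons_append] at *
  rw [zip_map, acc_fold]
  simp
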